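-- pv_equiv track=rewrite | github.com/jujaemin/Problem-Solving | 프로그래머스/lv2/12941. 최솟값 만들기/최솟값 만들기.py | solution
-- ===== SOURCE A (Python) =====
-- def solution(A,B):
--     A.sort()
--     B.sort(reverse = True)
--     answer = 0
--     for i in range(len(A)):
--         for j in range(len(B)):
--             answer += (A[0] * B[0])
--             del A[0]
--             del B[0]
--     return answer
-- ===== SOURCE B (Python) =====
-- def solution(A, B):
--     return sum(a * b for a, b in zip(sorted(A), sorted(B, reverse=True)))
-- ===== Notes on version B (the rewrite author's own statement) =====
-- stated objective: faster
-- what changed: Replaced the nested loops with O(n) front-deletions (del A[0]/del B[0]) by a single pass summing products of the two sorted lists zipped ascending/descending.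
import Mathlib
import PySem

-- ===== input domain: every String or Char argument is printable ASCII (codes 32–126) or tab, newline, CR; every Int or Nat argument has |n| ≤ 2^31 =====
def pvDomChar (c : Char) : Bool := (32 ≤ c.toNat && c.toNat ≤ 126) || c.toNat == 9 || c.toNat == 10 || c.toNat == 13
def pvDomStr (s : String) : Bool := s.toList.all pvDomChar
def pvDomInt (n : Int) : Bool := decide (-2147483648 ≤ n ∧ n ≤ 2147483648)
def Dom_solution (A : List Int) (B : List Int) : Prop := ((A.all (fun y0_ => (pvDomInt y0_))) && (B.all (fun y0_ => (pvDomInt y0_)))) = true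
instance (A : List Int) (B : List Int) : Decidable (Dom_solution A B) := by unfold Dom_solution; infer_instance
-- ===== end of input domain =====

-- B replaces A's quadratic nested loops with front-deletions by one pass over the
-- two sorted lists zipped ascending/descending (return value only: A sorts and
-- empties its argument lists in place, B does not mutate them).

-- ===== PORT A =====
-- inner 'for j in range(len(B))' body: answer += A[0]*B[0]; del A[0]; del B[0]
-- (A[0]/B[0] on an empty list raises in Python; those inputs are outside Pre_,
-- here the port reads a default 0)
def solAInner : List Int → List Int → Int → Nat → List Int × List Int × Int
  | A, B, ans, 0 => (A, B, ans)
  | A, B, ans, k+1 =>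
      solAInner (A.drop 1) (B.drop 1)
        (ans + ((PySem.List.pyGet? A 0).getD 0) * ((PySem.List.pyGet? B 0).getD 0)) k

-- outer 'for i in range(len(A))': each iteration runs the inner loop len(B) (current) times
def solAOuter : Nat → List Int × List Int × Int → List Int × List Int × Int
  | 0, s => s
  | k+1, (A, B, ans) => solAOuter k (solAInner A B ans B.length)

def solution (A : List Int) (B : List Int) : Int :=
  (solAOuter (PySem.List.sorted A (fun x => x) false).length
    (PySem.List.sorted A (fun x => x) false, PySem.List.sorted B (fun x => x) true, 0)).2.2

-- ===== PORT B =====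
def solution_alt (A : List Int) (B : List Int) : Int :=
  (((PySem.List.sorted A (fun x => x) false).zip
      (PySem.List.sorted B (fun x => x) true)).map (fun p => p.1 * p.2)).sum

-- ===== PRECONDITION & SPEC =====
-- Pre_ excludes exactly the inputs where A raises IndexError: 0 < len(A) < len(B)
def Pre_solution (A : List Int) (B : List Int) : Prop := A = [] ∨ B.length ≤ A.length
instance (A : List Int) (B : List Int) : Decidable (Pre_solution A B) := by
  unfold Pre_solution; infer_instance

def pvWitness_solution : List Int × List Int := ([1, 4, 2], [5, 4, 4])

def Spec_solution (A : List Int) (B : List Int) (out : Int) : Prop := out = solution_alt A B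
instance (A : List Int) (B : List Int) (out : Int) : Decidable (Spec_solution A B out) := by unfold Spec_solution; infer_instance

-- ===== CLAIM (what is proved, stated in full; the proofs are below) =====
def Claim_equal_solution : Prop := ∀ (A : List Int) (B : List Int), Dom_solution A B → Pre_solution A B → Spec_solution A B (solution A B)

-- ===== LEMMAS AND PROOFS =====

-- the inner loop, run len(B) times with len(B) ≤ len(A), consumes all of B
lemma solAInner_run (B : List Int) : ∀ (A : List Int) (ans : Int), B.length ≤ A.length →
    solAInner A B ans B.length =
      (A.drop B.length, [], ans + ((A.zip B).map (fun p => p.1 * p.2)).sum) := by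
  induction B with
  | nil => intro A ans _; simp [solAInner]
  | cons b B' ih =>
      intro A ans h
      cases A with
      | nil => simp at h
      | cons a A' =>
          simp only [List.length_cons, solAInner, List.drop_succ_cons, List.drop_zero,
            PySem.List.pyGet?, PySem.List.pyIdx?]
          norm_num
          rw [ih A' (ans + a * b) (by simpa using h)]
          simp [add_assoc]

-- once B is empty, every further outer iteration is a no-op
lemma solAOuter_nil (k : Nat) : ∀ (A : List Int) (ans : Int),
    solAOuter k (A, [], ans) = (A, [], ans) := by
  induction k with
  | zero => intro A ans; rfl
  | succ k ih => intro A ans; simpa [solAOuter, solAInner] using ih A ans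

theorem solution_spec : Claim_equal_solution := by
  intro A B _ hpre
  unfold Spec_solution solution solution_alt
  rcases hpre with h | h
  · subst h; simp [PySem.List.sorted, solAOuter]
  · have hlen : (PySem.List.sorted B (fun x => x) true).length ≤
        (PySem.List.sorted A (fun x => x) false).length := by
      simpa [PySem.List.length_sorted] using h
    cases hA : PySem.List.sorted A (fun x => x) false with
    | nil =>
        have : (PySem.List.sorted B (fun x => x) true) = [] := by
          rw [hA] at hlen; simpa using List.eq_nil_of_length_eq_zero (Nat.le_zero.mp hlen)
        simp [this, solAOuter]
    | cons a A' =>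
        rw [hA] at hlen
        simp only [List.length_cons, solAOuter]
        rw [solAInner_run _ _ 0 hlen, solAOuter_nil]
        simp
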